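-- pv_equiv track=rewrite | github.com/aumkar22/Chatbot | notebooks/CB_regex.py | detectQuestions
-- ===== SOURCE A (Python) =====
-- def detectQuestions(tagList):
--     start = 0
--     end = len(tagList)
--     for el in range(0, len(tagList)):
--         if tagList[el][1] == 'WP':
--             start = el + 1
--         if tagList[el][1] == '.' and tagList[el][0] == '?':
--             end = el
--     pred = tagList[start:end]
--     return pred
-- ===== SOURCE B (Python) =====
-- def detectQuestions(tagList):
--     n = len(tagList)
--     start = 0
--     for i in range(n - 1, -1, -1):
--         if tagList[i][1] == 'WP':
--             start = i + 1
--             break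
--     end = n
--     for i in range(n - 1, -1, -1):
--         if tagList[i][0] == '?' and tagList[i][1] == '.':
--             end = i
--             break
--     return tagList[start:end]
-- ===== Notes on version B (the rewrite author's own statement) =====
-- stated objective: alternative
-- what changed: Replaces A's single forward pass that keeps overwriting both boundaries with two independent reverse scans that break at the first (i.e. last) matching index, so each boundary is found without touching the rest of the list.
import Mathlib
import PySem

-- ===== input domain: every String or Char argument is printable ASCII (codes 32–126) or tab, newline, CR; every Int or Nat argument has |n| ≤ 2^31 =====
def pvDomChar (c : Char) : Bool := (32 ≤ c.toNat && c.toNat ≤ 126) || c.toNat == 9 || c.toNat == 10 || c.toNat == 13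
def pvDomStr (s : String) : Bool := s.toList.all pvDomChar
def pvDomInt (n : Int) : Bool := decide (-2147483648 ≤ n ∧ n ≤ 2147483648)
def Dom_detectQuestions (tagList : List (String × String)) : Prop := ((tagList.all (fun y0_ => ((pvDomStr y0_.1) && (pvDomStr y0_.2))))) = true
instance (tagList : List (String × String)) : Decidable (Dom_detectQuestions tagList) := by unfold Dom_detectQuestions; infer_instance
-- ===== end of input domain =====

-- B replaces A's single forward pass (which overwrites both boundaries at every match)
-- with two independent reverse scans that stop at the first match from the end; same cost.

-- ===== PORT A =====
-- A: one forward loop over all indices, updating (start, end) at every match.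
def detectQuestions (tagList : List (String × String)) : List (String × String) :=
  let n := tagList.length
  let p := (List.range n).foldl (fun (se : Int × Int) (el : Nat) =>
      let x := tagList[el]?.getD ("", "")
      ((if x.2 == "WP" then (el : Int) + 1 else se.1),
       (if x.2 == "." && x.1 == "?" then (el : Int) else se.2))) (0, (n : Int))
  PySem.List.slice tagList (some p.1) (some p.2)

-- ===== PORT B =====
-- B: reverse index scan for the last 'WP'; returns i+1, default 0 (the `break` is the early return).
def pvAltStart (tagList : List (String × String)) : List Nat → Int
  | [] => 0
  | i :: rest =>
      if (tagList[i]?.getD ("", "")).2 == "WP" then (i : Int) + 1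
      else pvAltStart tagList rest

-- B: reverse index scan for the last ('?', '.'); returns i, default len(tagList).
def pvAltEnd (tagList : List (String × String)) : List Nat → Int
  | [] => (tagList.length : Int)
  | i :: rest =>
      let x := tagList[i]?.getD ("", "")
      if x.1 == "?" && x.2 == "." then (i : Int)
      else pvAltEnd tagList rest

def detectQuestions_alt (tagList : List (String × String)) : List (String × String) :=
  let idxs := (List.range tagList.length).reverse   -- range(n-1, -1, -1)
  PySem.List.slice tagList (some (pvAltStart tagList idxs)) (some (pvAltEnd tagList idxs))

-- ===== PRECONDITION & SPEC =====
def Spec_detectQuestions (tagList : List (String × String)) (out : List (String × String)) : Prop := out = detectQuestions_alt tagList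
instance (tagList : List (String × String)) (out : List (String × String)) : Decidable (Spec_detectQuestions tagList out) := by unfold Spec_detectQuestions; infer_instance

-- ===== CLAIM (what is proved, stated in full; the proofs are below) =====
def Claim_equal_detectQuestions : Prop := ∀ (tagList : List (String × String)), Dom_detectQuestions tagList → Spec_detectQuestions tagList (detectQuestions tagList)

-- ===== LEMMAS AND PROOFS =====

-- A's forward fold over range k equals B's two reverse scans over (range k).reverse.
theorem pvLoop_eq (t : List (String × String)) (k : Nat) :
    (List.range k).foldl (fun (se : Int × Int) (el : Nat) =>
      let x := t[el]?.getD ("", "")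
      ((if x.2 == "WP" then (el : Int) + 1 else se.1),
       (if x.2 == "." && x.1 == "?" then (el : Int) else se.2))) (0, (t.length : Int))
    = (pvAltStart t (List.range k).reverse, pvAltEnd t (List.range k).reverse) := by
  induction k with
  | zero => simp [pvAltStart, pvAltEnd]
  | succ k ih =>
      rw [List.range_succ, List.foldl_append, ih]
      simp only [List.reverse_append, List.reverse_cons, List.reverse_nil, List.nil_append,
        List.cons_append, List.foldl_cons, List.foldl_nil, pvAltStart, pvAltEnd]
      rcases h : (t[k]?.getD ("", "")) with ⟨a, b⟩
      by_cases hb : b == "WP" <;> by_cases hq : (b == "." && a == "?") <;>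
        by_cases hq' : (a == "?" && b == ".") <;>
        simp_all [Bool.and_eq_true, and_comm]

-- ===== VERDICT (by name: the statement is the Claim_ definition above) =====
theorem detectQuestions_spec : Claim_equal_detectQuestions := by
  intro t _
  show detectQuestions t = detectQuestions_alt t
  simp only [detectQuestions, detectQuestions_alt, pvLoop_eq]
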